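-- pv_equiv track=rewrite | github.com/jej29/public_http_agent | agent/agent/analysis/features.py | _filter_meaningful_internal_ips
-- ===== SOURCE A (Python) =====
-- from typing import Any, Dict, List
--
-- def _dedup(items: List[str]) -> List[str]:
--     out: List[str] = []
--     seen = set()
--     for x in items or []:
--         s = str(x or "").strip()
--         if not s or s in seen:
--             continue
--         seen.add(s)
--         out.append(s)
--     return out
--
-- def _filter_meaningful_internal_ips(ips: List[str]) -> List[str]:
--     out: List[str] = []
--     for ip in ips or []:
--         s = str(ip or "").strip()
--         if not s:
--             continue
--
--         # loopback은 너무 약해서 시스템 정보 노출로 보지 않음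
--         if s.startswith("127."):
--             continue
--
--         # 0.0.0.0 도 제외
--         if s == "0.0.0.0":
--             continue
--
--         out.append(s)
--
--     return _dedup(out)
-- ===== SOURCE B (Python) =====
-- from typing import List
--
-- def _filter_meaningful_internal_ips(ips: List[str]) -> List[str]:
--     # back-to-front traversal, no seen-set: prepend each kept value and
--     # drop its duplicates from the already-built suffix result
--     res: List[str] = []
--     for ip in reversed(ips or []):
--         s = str(ip or "").strip()
--         if not s or s.startswith("127.") or s == "0.0.0.0":
--             continue
--         res = [s] + [t for t in res if t != s]
--     return res
-- ===== Notes on version B (the rewrite author's own statement) =====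
-- stated objective: alternative
-- what changed: Replaces the forward filter pass plus seen-set _dedup helper with a single back-to-front traversal that prepends each kept stripped value and removes its duplicates from the accumulated suffix result, so no set and no second pass exist.
import Mathlib
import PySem

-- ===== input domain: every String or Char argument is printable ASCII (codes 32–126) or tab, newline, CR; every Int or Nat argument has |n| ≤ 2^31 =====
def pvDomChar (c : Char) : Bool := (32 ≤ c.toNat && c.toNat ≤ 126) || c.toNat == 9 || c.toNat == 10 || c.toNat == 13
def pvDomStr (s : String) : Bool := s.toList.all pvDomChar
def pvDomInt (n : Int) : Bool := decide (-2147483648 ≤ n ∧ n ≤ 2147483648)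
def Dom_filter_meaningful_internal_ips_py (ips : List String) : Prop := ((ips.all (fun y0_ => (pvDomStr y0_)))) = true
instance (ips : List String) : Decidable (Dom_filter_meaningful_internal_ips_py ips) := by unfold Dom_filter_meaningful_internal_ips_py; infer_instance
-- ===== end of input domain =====

-- B replaces A's forward filter pass + seen-set _dedup helper by one back-to-front traversal that prepends each kept value and removes its duplicates from the accumulated result (alternative algorithm, no set); return value only, no mutation involved.


-- ===== PORT A =====
-- _dedup: out/seen loop, re-stripping each element (str(x or "").strip())
def pvDedup (items : List String) : List String :=
  (items.foldl (fun (st : List String × PySem.Set String) x =>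
      let s := PySem.Str.strip (if x = "" then "" else x)
      if s = "" ∨ PySem.Set.contains st.2 s then st
      else (st.1 ++ [s], PySem.Set.add st.2 s)) ([], PySem.Set.empty)).1

def filter_meaningful_internal_ips_py (ips : List String) : List String :=
  pvDedup (ips.foldl (fun (out : List String) ip =>
      let s := PySem.Str.strip (if ip = "" then "" else ip)
      if s = "" then out
      else if PySem.Str.startswith s "127." then out
      else if s = "0.0.0.0" then out
      else out ++ [s]) [])

-- ===== PORT B =====
-- loop over reversed(ips); each kept value is prepended and its duplicates dropped from the suffix result
def filter_meaningful_internal_ips_py_alt (ips : List String) : List String :=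
  (ips.reverse).foldl (fun (res : List String) ip =>
      let s := PySem.Str.strip (if ip = "" then "" else ip)
      if s = "" ∨ PySem.Str.startswith s "127." ∨ s = "0.0.0.0" then res
      else [s] ++ res.filter (fun t => t != s)) []

-- ===== PRECONDITION & SPEC =====
def Spec_filter_meaningful_internal_ips_py (ips : List String) (out : List String) : Prop := out = filter_meaningful_internal_ips_py_alt ips
instance (ips : List String) (out : List String) : Decidable (Spec_filter_meaningful_internal_ips_py ips out) := by unfold Spec_filter_meaningful_internal_ips_py; infer_instance

-- ===== CLAIM (what is proved, stated in full; the proofs are below) =====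
def Claim_equal_filter_meaningful_internal_ips_py : Prop := ∀ (ips : List String), Dom_filter_meaningful_internal_ips_py ips → Spec_filter_meaningful_internal_ips_py ips (filter_meaningful_internal_ips_py ips)

-- ===== LEMMAS AND PROOFS =====

-- the filtered, stripped values collected by A's first loop
def pvF (ips : List String) : List String :=
  ips.filterMap (fun ip =>
    let s := PySem.Str.strip (if ip = "" then "" else ip)
    if s = "" ∨ PySem.Str.startswith s "127." ∨ s = "0.0.0.0" then none else some s)

-- the dedup step without the re-strip and emptiness test
def pvStepD (st : List String × PySem.Set String) (s : String) : List String × PySem.Set String :=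
  if PySem.Set.contains st.2 s then st else (st.1 ++ [s], PySem.Set.add st.2 s)

-- keep-first-occurrence, expressed by B's prepend-and-remove recursion
def pvFirst : List String → List String
  | [] => []
  | x :: t => x :: (pvFirst t).filter (fun y => y != x)

-- keep-first-occurrence of the elements not already in S
def pvRes (S : PySem.Set String) : List String → List String
  | [] => []
  | x :: t => if PySem.Set.contains S x then pvRes S t else x :: pvRes (PySem.Set.add S x) t

-- a prefix of a left-stripped char list is left-stripped
theorem pv_dw_prefix_fixed {p : Char → Bool} {a b : List Char} (hb : b <+: a)
    (ha : List.dropWhile p a = a) : List.dropWhile p b = b := by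
  cases b with
  | nil => simp
  | cons x xs =>
    obtain ⟨t, ht⟩ := hb
    subst ht
    rw [List.cons_append, List.dropWhile_cons] at ha
    rw [List.dropWhile_cons]
    split at ha
    · exfalso
      have h1 := congrArg List.length ha
      have h2 := List.length_dropWhile_le p ((xs ++ t : List Char))
      simp at h1 h2
      omega
    · next h =>
      rw [if_neg h]

theorem pv_chars_strip_idem (l : List Char) :
    PySem.Chars.strip (PySem.Chars.strip l) = PySem.Chars.strip l := by
  unfold PySem.Chars.strip PySem.Chars.rstrip PySem.Chars.lstrip
  set p := PySem.Chars.isspace with hp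
  set a := List.dropWhile p l with haa
  set r := (List.dropWhile p a.reverse).reverse with hr
  have hpref : r <+: a := by
    have h := List.reverse_prefix.mpr (List.dropWhile_suffix (l := a.reverse) p)
    rwa [List.reverse_reverse] at h
  have h1 : List.dropWhile p a = a := List.dropWhile_idempotent p l
  have h2 : List.dropWhile p r = r := pv_dw_prefix_fixed hpref h1
  have h3 : List.dropWhile p r.reverse = r.reverse := by
    rw [hr, List.reverse_reverse]
    exact List.dropWhile_idempotent p a.reverse
  rw [h2, h3, hr, List.reverse_reverse]

theorem pv_strip_idem (s : String) : PySem.Str.strip (PySem.Str.strip s) = PySem.Str.strip s := by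
  unfold PySem.Str.strip
  rw [show (String.ofList (PySem.Chars.strip s.toList)).toList = PySem.Chars.strip s.toList by simp,
     pv_chars_strip_idem]

-- every element of pvF is a nonempty already-stripped string
theorem pvF_elem {ips : List String} {x : String}
    (hx : x ∈ pvF ips) : PySem.Str.strip (if x = "" then "" else x) = x ∧ x ≠ "" := by
  simp only [pvF, List.mem_filterMap] at hx
  obtain ⟨ip, -, hip⟩ := hx
  split_ifs at hip
  all_goals
    injection hip with hh
    subst hh
    rename_i hcond
    push Not at hcond
    obtain ⟨hne, -, -⟩ := hcond
    exact ⟨by rw [if_neg hne]; exact pv_strip_idem _, hne⟩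

theorem pvF_cons (ip : String) (t : List String) :
    pvF (ip :: t) =
      (let s := PySem.Str.strip (if ip = "" then "" else ip)
       if s = "" ∨ PySem.Str.startswith s "127." ∨ s = "0.0.0.0" then pvF t else s :: pvF t) := by
  simp only [pvF, List.filterMap_cons]
  split_ifs <;> rfl

-- A's first loop collects exactly acc ++ pvF ips
theorem pvA_fold (ips : List String) (acc : List String) :
    ips.foldl (fun (out : List String) ip =>
      let s := PySem.Str.strip (if ip = "" then "" else ip)
      if s = "" then out
      else if PySem.Str.startswith s "127." then out
      else if s = "0.0.0.0" then out
      else out ++ [s]) acc = acc ++ pvF ips := by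
  induction ips generalizing acc with
  | nil => simp [pvF]
  | cons ip t ih =>
    simp only [List.foldl_cons]
    rw [pvF_cons]
    simp only []
    split_ifs with h1 h2 h3 <;> rw [ih] <;> simp_all

-- A's _dedup fold equals the plain dedup fold on lists of nonempty stripped strings
theorem pvDedup_fold (l : List String) (st : List String × PySem.Set String)
    (h : ∀ x ∈ l, PySem.Str.strip (if x = "" then "" else x) = x ∧ x ≠ "") :
    l.foldl (fun (st : List String × PySem.Set String) x =>
      let s := PySem.Str.strip (if x = "" then "" else x)
      if s = "" ∨ PySem.Set.contains st.2 s then st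
      else (st.1 ++ [s], PySem.Set.add st.2 s)) st = l.foldl pvStepD st := by
  induction l generalizing st with
  | nil => rfl
  | cons x t ih =>
    obtain ⟨hs, hne⟩ := h x (by simp)
    have ht := fun y hy => h y (List.mem_cons_of_mem x hy)
    simp only [List.foldl_cons, hs]
    by_cases hc : PySem.Set.contains st.2 x = true
    · have e1 : pvStepD st x = st := by unfold pvStepD; rw [if_pos hc]
      rw [if_pos (Or.inr hc), e1]
      exact ih _ ht
    · have e1 : pvStepD st x = (st.1 ++ [x], PySem.Set.add st.2 x) := by
        unfold pvStepD; rw [if_neg hc]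
      rw [if_neg (by rintro (h1 | h2); exact hne h1; exact hc h2), e1]
      exact ih _ ht

-- the pvStepD fold writes acc ++ pvRes S l
theorem pvStep_fold (l : List String) (acc : List String) (S : PySem.Set String) :
    (l.foldl pvStepD (acc, S)).1 = acc ++ pvRes S l := by
  induction l generalizing acc S with
  | nil => simp [pvRes]
  | cons x t ih =>
    simp only [List.foldl_cons, pvRes]
    by_cases hc : PySem.Set.contains S x = true
    · rw [show pvStepD (acc, S) x = (acc, S) from by unfold pvStepD; rw [if_pos hc], if_pos hc]
      exact ih acc S
    · rw [show pvStepD (acc, S) x = (acc ++ [x], PySem.Set.add S x) from by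
          unfold pvStepD; rw [if_neg hc], if_neg hc, ih, List.append_assoc]
      rfl

theorem pv_contains_add (S : PySem.Set String) (x y : String) :
    PySem.Set.contains (PySem.Set.add S x) y = (PySem.Set.contains S y || y == x) := by
  by_cases h1 : y ∈ S
  · have hm : y ∈ PySem.Set.add S x := (PySem.Set.mem_add S x y).2 (Or.inl h1)
    rw [(PySem.Set.contains_iff _ _).2 hm, (PySem.Set.contains_iff _ _).2 h1, Bool.true_or]
  · by_cases h2 : y = x
    · have hm : y ∈ PySem.Set.add S x := (PySem.Set.mem_add S x y).2 (Or.inr h2)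
      rw [(PySem.Set.contains_iff _ _).2 hm, h2]
      simp
    · have h3 : y ∉ PySem.Set.add S x := fun h => by
        rcases (PySem.Set.mem_add S x y).1 h with h | h
        · exact h1 h
        · exact h2 h
      have c1 : PySem.Set.contains (PySem.Set.add S x) y = false := by
        cases hb : PySem.Set.contains (PySem.Set.add S x) y
        · rfl
        · exact absurd ((PySem.Set.contains_iff _ _).1 hb) h3
      have c2 : PySem.Set.contains S y = false := by
        cases hb : PySem.Set.contains S y
        · rfl
        · exact absurd ((PySem.Set.contains_iff _ _).1 hb) h1
      rw [c1, c2, Bool.false_or]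
      simp [h2]

-- pvRes S l keeps exactly the first occurrences not already in S
theorem pvRes_eq (l : List String) (S : PySem.Set String) :
    pvRes S l = (pvFirst l).filter (fun y => !(PySem.Set.contains S y)) := by
  induction l generalizing S with
  | nil => rfl
  | cons x t ih =>
    simp only [pvRes, pvFirst]
    by_cases hc : PySem.Set.contains S x = true
    · rw [if_pos hc, ih, List.filter_cons_of_neg (by rw [hc]; simp), List.filter_filter]
      apply List.filter_congr
      intro y _
      by_cases hyx : y = x
      · subst hyx
        rw [hc]
        simp
      · have hb : (y != x) = true := by simp [hyx]
        rw [hb, Bool.and_true]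
    · have hc' : PySem.Set.contains S x = false := Bool.eq_false_iff.mpr hc
      rw [if_neg hc, ih, List.filter_cons_of_pos (by rw [hc']; rfl), List.filter_filter]
      congr 1
      apply List.filter_congr
      intro y _
      rw [pv_contains_add, Bool.not_or]
      by_cases hyx : y = x
      · subst hyx
        rw [hc']
        simp
      · rfl

-- B's reversed loop computes pvFirst of the filtered values
theorem pvB_eq (ips : List String) :
    filter_meaningful_internal_ips_py_alt ips = pvFirst (pvF ips) := by
  unfold filter_meaningful_internal_ips_py_alt
  rw [List.foldl_reverse]
  induction ips with
  | nil => rfl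
  | cons ip t ih =>
    rw [List.foldr_cons, ih, pvF_cons]
    simp only []
    split_ifs <;> simp [pvFirst]

-- ===== VERDICT (by name: the statement is the Claim_ definition above) =====
theorem filter_meaningful_internal_ips_py_spec : Claim_equal_filter_meaningful_internal_ips_py := by
  intro ips _
  unfold Spec_filter_meaningful_internal_ips_py filter_meaningful_internal_ips_py pvDedup
  rw [pvA_fold, List.nil_append, pvDedup_fold _ _ (fun x hx => pvF_elem hx), pvStep_fold,
     List.nil_append, pvRes_eq, pvB_eq]
  apply (List.filter_eq_self).2
  intro y _
  have hce : PySem.Set.contains (PySem.Set.empty (α := String)) y = false := by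
    cases hb : PySem.Set.contains (PySem.Set.empty (α := String)) y
    · rfl
    · exact absurd ((PySem.Set.contains_iff _ _).1 hb) (List.not_mem_nil)
  rw [hce]
  rfl
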